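-- pv_equiv track=rewrite | github.com/geekben/codeiscool | leetcode/1653.py | minimumDeletions
-- ===== SOURCE A (Python) =====
-- def minimumDeletions(s):
--     """
--     :type s: str
--     :rtype: int
--     """
--     an = 0
--     bn = 0
--     t = 'a'
--     ret = 0
--
--     for c in s:
--         if c == 'a':
--             if t == 'a':
--                 pass
--             else:
--                 if bn > an:
--                     an += 1
--                 else:
--                     t = 'a'
--                     ret += bn
--                     bn = 0
--                     an = 0
--         else:
--             t = 'b'
--             bn += 1
--
--     return an + ret
-- ===== SOURCE B (Python) =====
-- def minimumDeletions(s):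
--     """
--     :type s: str
--     :rtype: int
--     """
--     b_count = 0
--     deletions = 0
--     for c in s:
--         if c == 'a':
--             deletions = min(deletions + 1, b_count)
--         else:
--             b_count += 1
--     return deletions
-- ===== Notes on version B (the rewrite author's own statement) =====
-- stated objective: simpler
-- what changed: Replaced A's four-variable segment-tracking state machine (mode flag, per-segment a/b counters, reset-and-accumulate) with the standard two-variable DP: b_count of 'b's seen and deletions = min(deletions+1, b_count) per 'a'.
import Mathlib
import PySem

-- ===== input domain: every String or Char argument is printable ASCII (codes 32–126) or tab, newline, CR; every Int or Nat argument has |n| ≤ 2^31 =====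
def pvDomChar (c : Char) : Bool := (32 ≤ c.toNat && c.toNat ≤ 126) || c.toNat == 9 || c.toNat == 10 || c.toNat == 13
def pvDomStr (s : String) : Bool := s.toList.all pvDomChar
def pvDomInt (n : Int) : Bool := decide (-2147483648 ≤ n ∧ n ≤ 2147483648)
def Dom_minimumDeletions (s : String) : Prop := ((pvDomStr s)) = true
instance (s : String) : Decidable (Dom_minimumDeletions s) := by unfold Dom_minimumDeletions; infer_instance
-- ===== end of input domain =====

-- B replaces A's four-variable segment state machine with the standard two-variable DP; same O(n), simpler.

-- ===== PORT A =====
-- state (an, bn, t, ret), exactly A's four variables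
def pvStepA (st : Int × Int × Char × Int) (c : Char) : Int × Int × Char × Int :=
  let (an, bn, t, ret) := st
  if c = 'a' then
    if t = 'a' then st
    else if bn > an then (an + 1, bn, t, ret)
    else (0, 0, 'a', ret + bn)
  else (an, bn + 1, 'b', ret)

def minimumDeletions (s : String) : Int :=
  let st := s.toList.foldl pvStepA (0, 0, 'a', 0)
  st.1 + st.2.2.2

-- ===== PORT B =====
-- state (b_count, deletions)
def pvStepB (st : Int × Int) (c : Char) : Int × Int :=
  if c = 'a' then (st.1, min (st.2 + 1) st.1) else (st.1 + 1, st.2)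

def minimumDeletions_alt (s : String) : Int :=
  (s.toList.foldl pvStepB (0, 0)).2

-- ===== PRECONDITION & SPEC =====
def Spec_minimumDeletions (s : String) (out : Int) : Prop := out = minimumDeletions_alt s
instance (s : String) (out : Int) : Decidable (Spec_minimumDeletions s out) := by unfold Spec_minimumDeletions; infer_instance

-- ===== CLAIM (what is proved, stated in full; the proofs are below) =====
def Claim_equal_minimumDeletions : Prop := ∀ (s : String), Dom_minimumDeletions s → Spec_minimumDeletions s (minimumDeletions s)

-- ===== LEMMAS AND PROOFS =====

-- Invariant linking A's state to B's: deletions = ret + an, b_count = ret + bn,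
-- in mode 'a' both counters are zero, otherwise an ≤ bn.
def pvInv (st : Int × Int × Char × Int) (bd : Int × Int) : Prop :=
  bd.2 = st.2.2.2 + st.1 ∧ bd.1 = st.2.2.2 + st.2.1 ∧
  (st.2.2.1 = 'a' → st.1 = 0 ∧ st.2.1 = 0) ∧ (st.2.2.1 ≠ 'a' → st.1 ≤ st.2.1)

theorem pvInv_step (st : Int × Int × Char × Int) (bd : Int × Int) (c : Char)
    (h : pvInv st bd) : pvInv (pvStepA st c) (pvStepB bd c) := by
  obtain ⟨an, bn, t, ret⟩ := st
  obtain ⟨b, d⟩ := bd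
  obtain ⟨h1, h2, h3, h4⟩ := h
  simp only [pvInv] at *
  by_cases hc : c = 'a' <;> by_cases ht : t = 'a' <;>
    simp only [pvStepA, pvStepB, hc, ht, if_pos, if_neg, ne_eq, not_false_eq_true,
      min_def] <;> simp_all <;>
    first
    | omega
    | (by_cases hba : bn > an <;> simp [hba, ht] <;> omega)

theorem pvInv_foldl (l : List Char) (st : Int × Int × Char × Int) (bd : Int × Int)
    (h : pvInv st bd) : pvInv (l.foldl pvStepA st) (l.foldl pvStepB bd) := by
  induction l generalizing st bd with
  | nil => exact h
  | cons c l ih => exact ih _ _ (pvInv_step st bd c h)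

-- ===== VERDICT (by name: the statement is the Claim_ definition above) =====
theorem minimumDeletions_spec : Claim_equal_minimumDeletions := by
  intro s _
  have h := pvInv_foldl s.toList (0, 0, 'a', 0) (0, 0) (by simp [pvInv])
  simp only [Spec_minimumDeletions, minimumDeletions, minimumDeletions_alt]
  obtain ⟨h1, -, -, -⟩ := h
  omega
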